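-- pv_equiv track=rewrite | github.com/NekoRollex/SW305_Problemas | Algoritmo KMP/p10_MC.py | BusquedaNaive
-- ===== SOURCE A (Python) =====
-- def BusquedaNaive(cadena: str , patron: str):
--     comparaciones = 0
--     posiciones = []
--     i = 0
--     j = 0
--     n1 = len(cadena)
--     n2 = len(patron)
--
--     if n1 < n2:
--         return None
--
--     while i < n1:
--         if cadena[i] == patron[0]:
--             k = i
--             j = 0
--             while (k < n1 and j < n2) and patron[j] == cadena[k]:
--                 comparaciones += 1
--                 k += 1
--                 j += 1
--             if j == n2:
--                 posiciones.append(i)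
--         else:
--             comparaciones += 1
--         i += 1
--     return posiciones, comparaciones
-- ===== SOURCE B (Python) =====
-- def BusquedaNaive(cadena: str, patron: str):
--     n1 = len(cadena)
--     n2 = len(patron)
--     if n1 < n2:
--         return None
--     def lcp(a, b):
--         c = 0
--         for x, y in zip(a, b):
--             if x != y:
--                 break
--             c += 1
--         return c
--     ls = [lcp(patron, cadena[i:]) for i in range(n1)]
--     posiciones = [i for i, l in enumerate(ls) if l == n2]
--     comparaciones = sum(max(l, 1) for l in ls)
--     return posiciones, comparaciones
-- ===== Notes on version B (the rewrite author's own statement) =====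
-- stated objective: alternative
-- what changed: Replaces the nested while loops with mutable counters by a per-position prefix-match-length array computed once, from which both the match positions (filter l == len(patron)) and the comparison count (sum of max(l,1)) are derived by closed formulas.
import Mathlib
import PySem

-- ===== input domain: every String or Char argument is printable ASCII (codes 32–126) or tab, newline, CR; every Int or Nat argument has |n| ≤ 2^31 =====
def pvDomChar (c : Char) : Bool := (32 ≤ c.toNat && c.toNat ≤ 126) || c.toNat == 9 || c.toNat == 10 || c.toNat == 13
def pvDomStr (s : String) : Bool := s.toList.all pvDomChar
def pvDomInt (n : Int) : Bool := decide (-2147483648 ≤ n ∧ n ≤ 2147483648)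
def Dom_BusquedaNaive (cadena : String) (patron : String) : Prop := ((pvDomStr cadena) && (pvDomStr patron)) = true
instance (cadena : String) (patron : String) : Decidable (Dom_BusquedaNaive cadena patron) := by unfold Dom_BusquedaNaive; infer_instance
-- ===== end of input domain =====

-- B replaces A's nested while loops by a per-position prefix-match-length array and derives
-- positions and the comparison count from it by closed formulas (objective: alternative).

-- ===== PORT A =====
-- inner while loop of A: `while (k < n1 and j < n2) and patron[j] == cadena[k]:`.
-- In-range accesses are ported with getD (exact: the guards k < n1, j < n2 hold when read).
def pvInnerA (s p : List Char) (k j comp : Nat) : Nat × Nat :=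
  if k < s.length ∧ j < p.length ∧ p.getD j ' ' = s.getD k ' ' then
    pvInnerA s p (k+1) (j+1) (comp+1)
  else (j, comp)
termination_by s.length - k
decreasing_by omega

-- outer while loop of A. `cadena[i]` is in range (i < n1); `patron[0]` is ported with getD,
-- exact whenever patron ≠ "" (Pre_ excludes the IndexError case patron = "" with cadena ≠ "").
def pvOuterA (s p : List Char) (i : Nat) (pos : List Int) (comp : Nat) : List Int × Nat :=
  if i < s.length then
    if s.getD i ' ' = p.getD 0 ' ' then
      let r := pvInnerA s p i 0 comp
      pvOuterA s p (i+1) (if r.1 = p.length then pos ++ [(i : Int)] else pos) r.2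
    else
      pvOuterA s p (i+1) pos (comp+1)
  else (pos, comp)
termination_by s.length - i
decreasing_by all_goals omega

def BusquedaNaive (cadena : String) (patron : String) : Option (List Int × Int) :=
  let s := cadena.toList
  let p := patron.toList
  if (s.length : Int) < (p.length : Int) then none
  else
    let r := pvOuterA s p 0 [] 0
    some (r.1, (r.2 : Int))

-- ===== PORT B =====
-- lcp a b = number of equal leading characters of a and b (Source B's lcp over zip(a,b))
def pvLcp : List Char → List Char → Nat
  | x :: a, y :: b => if x = y then pvLcp a b + 1 else 0
  | _, _ => 0

def BusquedaNaive_alt (cadena : String) (patron : String) : Option (List Int × Int) :=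
  let s := cadena.toList
  let p := patron.toList
  if (s.length : Int) < (p.length : Int) then none
  else
    let ls := (List.range s.length).map (fun i => pvLcp p (s.drop i))
    let posiciones := (PySem.List.enumerate ls).filterMap
      (fun q => if q.2 = p.length then some q.1 else none)
    let comparaciones := (ls.map (fun l => max l 1)).sum
    some (posiciones, (comparaciones : Int))

-- ===== PRECONDITION & SPEC =====
-- Pre_ excludes exactly the inputs where A raises IndexError: empty patron with nonempty cadena.
def Pre_BusquedaNaive (cadena : String) (patron : String) : Prop :=
  patron ≠ "" ∨ cadena = ""
instance (cadena : String) (patron : String) : Decidable (Pre_BusquedaNaive cadena patron) := by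
  unfold Pre_BusquedaNaive; infer_instance
def pvWitness_BusquedaNaive : String × String := ("abracadabra", "abra")

def Spec_BusquedaNaive (cadena : String) (patron : String) (out : Option (List Int × Int)) : Prop := out = BusquedaNaive_alt cadena patron
instance (cadena : String) (patron : String) (out : Option (List Int × Int)) : Decidable (Spec_BusquedaNaive cadena patron out) := by unfold Spec_BusquedaNaive; infer_instance

-- ===== CLAIM (what is proved, stated in full; the proofs are below) =====
def Claim_equal_BusquedaNaive : Prop := ∀ (cadena : String) (patron : String), Dom_BusquedaNaive cadena patron → Pre_BusquedaNaive cadena patron → Spec_BusquedaNaive cadena patron (BusquedaNaive cadena patron)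
-- ===== LEMMAS AND PROOFS =====

theorem pvLcp_drop_pos  {s p : List Char} {k j : Nat}
    (hk : k < s.length) (hj : j < p.length) (he : p.getD j ' ' = s.getD k ' ') :
    pvLcp (p.drop j) (s.drop k) = pvLcp (p.drop (j+1)) (s.drop (k+1)) + 1 := by
  rw [List.drop_eq_getElem_cons hk, List.drop_eq_getElem_cons hj]
  rw [List.getD_eq_getElem _ _ hj, List.getD_eq_getElem _ _ hk] at he
  simp [pvLcp, he]

theorem pvLcp_drop_zero  {s p : List Char} {k j : Nat}
    (h : ¬ (k < s.length ∧ j < p.length ∧ p.getD j ' ' = s.getD k ' ')) :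
    pvLcp (p.drop j) (s.drop k) = 0 := by
  by_cases hk : k < s.length
  · by_cases hj : j < p.length
    · have hne : p.getD j ' ' ≠ s.getD k ' ' := by tauto
      rw [List.drop_eq_getElem_cons hk, List.drop_eq_getElem_cons hj]
      rw [List.getD_eq_getElem _ _ hj, List.getD_eq_getElem _ _ hk] at hne
      simp [pvLcp, hne]
    · rw [List.drop_eq_nil_of_le (by omega)]; simp [pvLcp]
  · rw [List.drop_eq_nil_of_le (as := s) (by omega)]
    cases p.drop j <;> simp [pvLcp]

theorem pvInnerA_eq  (s p : List Char) (k j comp : Nat) :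
    pvInnerA s p k j comp =
      (j + pvLcp (p.drop j) (s.drop k), comp + pvLcp (p.drop j) (s.drop k)) := by
  induction k, j, comp using pvInnerA.induct (s := s) (p := p) with
  | case1 k j comp h ih =>
    rw [pvInnerA, if_pos h, ih, pvLcp_drop_pos h.1 h.2.1 h.2.2]
    simp [Prod.ext_iff]; omega
  | case2 k j comp h =>
    rw [pvInnerA, if_neg h, pvLcp_drop_zero h]
    simp

theorem pvOuterA_eq  (s p : List Char) (hp : p ≠ []) (i : Nat) (pos : List Int) (comp : Nat) :
    pvOuterA s p i pos comp =
      (pos ++ (List.range' i (s.length - i)).filterMap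
          (fun i' => if pvLcp p (s.drop i') = p.length then some (i' : Int) else none),
       comp + ((List.range' i (s.length - i)).map
          (fun i' => max (pvLcp p (s.drop i')) 1)).sum) := by
  have hp0 : 0 < p.length := List.length_pos_iff.mpr hp
  induction i, pos, comp using pvOuterA.induct (s := s) (p := p) with
  | case1 i pos comp hi heq r ih =>
    have hrange : List.range' i (s.length - i) = i :: List.range' (i+1) (s.length - (i+1)) := by
      have : s.length - i = (s.length - (i+1)) + 1 := by omega
      rw [this, List.range'_succ]
    have hr : r = (pvLcp p (s.drop i), comp + pvLcp p (s.drop i)) := by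
      simpa using pvInnerA_eq s p i 0 comp
    have hpos : 1 ≤ pvLcp p (s.drop i) := by
      have := pvLcp_drop_pos hi hp0 heq.symm
      simp at this; omega
    rw [pvOuterA, if_pos hi, if_pos heq]
    simp only [dite_eq_ite] at ih
    show pvOuterA s p (i+1) (if r.1 = p.length then pos ++ [(i : Int)] else pos) r.2 = _
    rw [ih, hrange, hr]
    simp only [List.filterMap_cons, List.map_cons, List.sum_cons]
    by_cases hl : pvLcp p (s.drop i) = p.length
    · simp [hl, Prod.ext_iff]
      omega
    · simp [hl, Prod.ext_iff]
      omega
  | case2 i pos comp hi hne ih =>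
    have hrange : List.range' i (s.length - i) = i :: List.range' (i+1) (s.length - (i+1)) := by
      have : s.length - i = (s.length - (i+1)) + 1 := by omega
      rw [this, List.range'_succ]
    have hz : pvLcp p (s.drop i) = 0 := by
      apply pvLcp_drop_zero (k := i) (j := 0)
      intro h; exact hne h.2.2.symm
    rw [pvOuterA, if_pos hi, if_neg hne, ih, hrange]
    simp only [List.filterMap_cons, List.map_cons, List.sum_cons, hz]
    rw [if_neg (by omega)]
    simp [Prod.ext_iff]; omega
  | case3 i pos comp hi =>
    have : s.length - i = 0 := by omega
    simp [pvOuterA, hi, this]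

-- B's enumerate/filter over the lcp array equals the range'-based form used in pvOuterA_eq
theorem altPos_range' {α : Type} (f : Nat → α) (m : α) [DecidableEq α] :
    ∀ (n s : Nat),
    (PySem.List.enumerate ((List.range' s n).map f) (s : Int)).filterMap
        (fun q => if q.2 = m then some q.1 else none) =
      (List.range' s n).filterMap
        (fun i' => if f i' = m then some (i' : Int) else none)
  | 0, s => by simp [PySem.List.enumerate_nil]
  | n+1, s => by
    rw [List.range'_succ]
    simp only [List.map_cons, PySem.List.enumerate_cons, List.filterMap_cons]
    have : ((s : Int) + 1) = ((s + 1 : Nat) : Int) := by push_cast; ring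
    rw [this, altPos_range' f m n (s+1)]

theorem toList_ne_nil_of_ne_empty {c : String} (h : c ≠ "") : c.toList ≠ [] := by
  intro h2
  apply h
  have := congrArg String.ofList h2
  simpa using this

-- ===== VERDICT (by name: the statement is the Claim_ definition above) =====
theorem BusquedaNaive_spec : Claim_equal_BusquedaNaive := by
  intro cadena patron _ hpre
  unfold Spec_BusquedaNaive BusquedaNaive BusquedaNaive_alt
  by_cases hp : patron = ""
  · rcases hpre with h | h
    · exact absurd hp h
    · subst hp; subst h
      simp [pvOuterA, PySem.List.enumerate_nil]
  · have hpl : patron.toList ≠ [] := toList_ne_nil_of_ne_empty hp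
    simp only []
    by_cases hlt : (cadena.toList.length : Int) < (patron.toList.length : Int)
    · rw [if_pos hlt, if_pos hlt]
    · rw [if_neg hlt, if_neg hlt]
      rw [pvOuterA_eq _ _ hpl]
      have hpos := altPos_range' (fun i => pvLcp patron.toList (cadena.toList.drop i))
        patron.toList.length cadena.toList.length 0
      simp only [Nat.cast_zero] at hpos
      simp only [Nat.sub_zero, List.nil_append, Nat.zero_add, List.range_eq_range',
        List.map_map]
      rw [← hpos]
      simp [Function.comp_def]
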